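-- pv_equiv track=rewrite | github.com/sivm205/Prepinsta-top-100 | p77.py | sort_first_by_second
-- ===== SOURCE A (Python) =====
-- def sort_first_by_second(array1, array2):
--     temp_list = []
--     for i in range(len(array2)):
--         for j in range(len(array1)):
--             if array1[j] == array2[i]:
--                 temp_list.append(array1[j])
--
--     for i in array1:
--         if i not in temp_list:
--             temp_list.append(i)
--
--     return temp_list
-- ===== SOURCE B (Python) =====
-- def sort_first_by_second(array1, array2):
--     count = {}
--     for x in array1:
--         count[x] = count.get(x, 0) + 1
--     out = []
--     seen = set()
--     for v in array2:
--         c = count.get(v, 0)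
--         if c:
--             out.extend([v] * c)
--             seen.add(v)
--     for x in array1:
--         if x not in seen:
--             seen.add(x)
--             out.append(x)
--     return out
-- ===== Notes on version B (the rewrite author's own statement) =====
-- stated objective: faster
-- what changed: replaces the O(n*m) nested index scans with a one-pass count dict that emits each array2 element count-many times, and replaces the quadratic not-in scan over the growing result with a hash set of already-emitted values
import Mathlib
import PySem

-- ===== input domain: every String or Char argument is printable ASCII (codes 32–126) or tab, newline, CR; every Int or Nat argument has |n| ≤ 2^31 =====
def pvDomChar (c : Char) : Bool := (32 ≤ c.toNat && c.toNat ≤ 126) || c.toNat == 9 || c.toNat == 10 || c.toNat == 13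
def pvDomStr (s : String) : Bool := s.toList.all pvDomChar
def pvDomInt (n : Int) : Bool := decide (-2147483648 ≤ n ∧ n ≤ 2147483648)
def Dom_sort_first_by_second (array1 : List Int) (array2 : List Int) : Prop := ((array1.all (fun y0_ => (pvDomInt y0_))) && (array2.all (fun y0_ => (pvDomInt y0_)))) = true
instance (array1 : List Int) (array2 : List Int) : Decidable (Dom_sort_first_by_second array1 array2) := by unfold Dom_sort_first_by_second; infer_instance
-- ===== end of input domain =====

-- B replaces A's nested index scans by a count dict emitting runs, and A's list-membership scan by a set.

-- ===== PORT A =====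
def sort_first_by_second (array1 : List Int) (array2 : List Int) : List Int :=
  let temp_list : List Int :=
    (PySem.List.pyRange 0 array2.length 1).foldl (fun temp i =>
      (PySem.List.pyRange 0 array1.length 1).foldl (fun temp j =>
        if PySem.List.pyGetD array1 j 0 == PySem.List.pyGetD array2 i 0 then
          temp ++ [PySem.List.pyGetD array1 j 0]
        else temp) temp) []
  array1.foldl (fun temp i => if temp.contains i then temp else temp ++ [i]) temp_list

-- ===== PORT B =====
-- 'c = count.get(v, 0); if c: out.extend([v]*c); seen.add(v)' — one step of B's first loop over array2
def phase1Step (cnt : PySem.Dict Int Int) (p : List Int × PySem.Set Int) (v : Int) :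
    List Int × PySem.Set Int :=
  let c := cnt.getD v 0
  if c ≠ 0 then (p.1 ++ List.replicate c.toNat v, p.2.add v) else p

-- 'if x not in seen: seen.add(x); out.append(x)' — one step of B's second loop over array1
def phase2Step (p : List Int × PySem.Set Int) (x : Int) : List Int × PySem.Set Int :=
  if p.2.contains x then p else (p.1 ++ [x], p.2.add x)

def sort_first_by_second_alt (array1 : List Int) (array2 : List Int) : List Int :=
  let count : PySem.Dict Int Int :=
    array1.foldl (fun d x => d.modify x 0 (· + 1)) PySem.Dict.empty
  let p : List Int × PySem.Set Int :=
    array2.foldl (phase1Step count) ([], PySem.Set.empty)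
  (array1.foldl phase2Step p).1

-- ===== PRECONDITION & SPEC =====
def Spec_sort_first_by_second (array1 : List Int) (array2 : List Int) (out : List Int) : Prop := out = sort_first_by_second_alt array1 array2
instance (array1 : List Int) (array2 : List Int) (out : List Int) : Decidable (Spec_sort_first_by_second array1 array2 out) := by unfold Spec_sort_first_by_second; infer_instance

-- ===== CLAIM (what is proved, stated in full; the proofs are below) =====
def Claim_equal_sort_first_by_second : Prop := ∀ (array1 : List Int) (array2 : List Int), Dom_sort_first_by_second array1 array2 → Spec_sort_first_by_second array1 array2 (sort_first_by_second array1 array2)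

-- ===== LEMMAS AND PROOFS =====

-- A's inner scan over array1 collects exactly count-many copies of the probed value.
theorem inner_scan_eq_replicate (array1 : List Int) (v : Int) (t : List Int) :
    array1.foldl (fun temp x => if x == v then temp ++ [x] else temp) t
      = t ++ List.replicate (array1.count v) v := by
  rw [PySem.List.foldl_append_if_eq_filter]
  congr 1
  simp [List.filter_beq]

-- Phase 1, value side: A's doubly-nested loop equals the unconditional count-and-emit fold.
theorem phase1_eq (array1 array2 : List Int) :
    (PySem.List.pyRange 0 array2.length 1).foldl (fun temp i =>
      (PySem.List.pyRange 0 array1.length 1).foldl (fun temp j =>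
        if PySem.List.pyGetD array1 j 0 == PySem.List.pyGetD array2 i 0 then
          temp ++ [PySem.List.pyGetD array1 j 0]
        else temp) temp) []
    = array2.foldl (fun out v =>
        out ++ List.replicate (((array1.foldl (fun d x => d.modify x 0 (· + 1))
          PySem.Dict.empty : PySem.Dict Int Int).getD v 0).toNat) v) [] := by
  rw [PySem.List.foldl_pyRange_zero_pyGetD' array2 0
      (fun temp v =>
        (PySem.List.pyRange 0 array1.length 1).foldl (fun temp j =>
          if PySem.List.pyGetD array1 j 0 == v then temp ++ [PySem.List.pyGetD array1 j 0]
          else temp) temp) []]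
  apply PySem.List.foldl_congr_mem
  intro t v _
  rw [PySem.List.foldl_pyRange_zero_pyGetD' array1 0
      (fun temp x => if x == v then temp ++ [x] else temp) t]
  rw [inner_scan_eq_replicate]
  rw [← PySem.Dict.counter_eq_foldl, PySem.Dict.getD_counter]
  simp only [Int.toNat_natCast]

-- Phase 1, pair side: B's guarded fold produces the same list, and its set tracks
-- exactly the membership of the accumulated list.
theorem phase1_pair (cnt : PySem.Dict Int Int) (hpos : ∀ v : Int, 0 ≤ cnt.getD v 0)
    (l : List Int) (acc : List Int) (s : PySem.Set Int)
    (h : ∀ x : Int, x ∈ s ↔ x ∈ acc) :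
    (l.foldl (phase1Step cnt) (acc, s)).1
      = l.foldl (fun out v => out ++ List.replicate ((cnt.getD v 0).toNat) v) acc
    ∧ (∀ x : Int, x ∈ (l.foldl (phase1Step cnt) (acc, s)).2
        ↔ x ∈ (l.foldl (phase1Step cnt) (acc, s)).1) := by
  induction l generalizing acc s with
  | nil => exact ⟨rfl, h⟩
  | cons v l ih =>
    simp only [List.foldl_cons, phase1Step]
    by_cases hc : cnt.getD v 0 ≠ 0
    · simp only [if_pos hc]
      apply ih
      intro x
      have hpos' := hpos v
      have hn : (cnt.getD v 0).toNat ≠ 0 := by omega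
      simp [PySem.Set.mem_add, List.mem_replicate, hn, h x]
    · simp only [if_neg hc]
      rw [not_ne_iff] at hc
      rw [hc]
      simp only [Int.toNat_zero, List.replicate_zero, List.append_nil]
      exact ih acc s h

-- Phase 2: A's list-membership loop equals B's set-membership loop, given that the
-- starting set's membership agrees with the starting list's.
theorem phase2_eq (l : List Int) (p : List Int × PySem.Set Int)
    (h : ∀ x : Int, x ∈ p.2 ↔ x ∈ p.1) :
    l.foldl (fun temp i => if temp.contains i then temp else temp ++ [i]) p.1
      = (l.foldl phase2Step p).1 := by
  induction l generalizing p with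
  | nil => simp
  | cons a l ih =>
    simp only [List.foldl_cons, phase2Step]
    have hc : p.2.contains a = p.1.contains a := by
      by_cases hm : a ∈ p.1
      · have h2 : a ∈ p.2 := (h a).2 hm
        simp [PySem.Set.contains, hm, h2]
      · have h2 : a ∉ p.2 := fun hs => hm ((h a).1 hs)
        simp [PySem.Set.contains, hm, h2]
    rw [hc]
    by_cases hb : p.1.contains a = true
    · rw [hb]
      simp only [if_true]
      exact ih p h
    · rw [Bool.not_eq_true] at hb
      rw [hb]
      simp only [Bool.false_eq_true, if_false]
      apply ih (p.1 ++ [a], p.2.add a)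
      intro x
      simp only [PySem.Set.mem_add, List.mem_append, List.mem_singleton, h x]

theorem sort_eq (array1 array2 : List Int) :
    sort_first_by_second array1 array2 = sort_first_by_second_alt array1 array2 := by
  unfold sort_first_by_second sort_first_by_second_alt
  rw [phase1_eq]
  have hpos : ∀ v : Int, 0 ≤ (array1.foldl (fun d x => d.modify x 0 (· + 1))
      (PySem.Dict.empty : PySem.Dict Int Int)).getD v 0 := by
    intro v
    rw [← PySem.Dict.counter_eq_foldl, PySem.Dict.getD_counter]
    exact Int.natCast_nonneg _
  obtain ⟨h1, h2⟩ := phase1_pair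
    (array1.foldl (fun d x => d.modify x 0 (· + 1)) PySem.Dict.empty) hpos
    array2 [] PySem.Set.empty (by simp [PySem.Set.empty])
  rw [← h1]
  exact phase2_eq array1 _ h2

-- ===== VERDICT (by name: the statement is the Claim_ definition above) =====
theorem sort_first_by_second_spec : Claim_equal_sort_first_by_second := by
  intro a1 a2 _
  unfold Spec_sort_first_by_second
  exact sort_eq a1 a2
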